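-- pv_equiv track=rewrite | github.com/cisselab/ClusterSpy | ClusterSpy_Backend.py | ClusterCoordPair
-- ===== SOURCE A (Python) =====
-- def ClusterCoordPair(MList,NumCluster):
--     ClusterCoordDict = {}
--     for i in range(NumCluster):
--         coordmap = []
--         for j in MList:
--             if j[1] == i:
--                 coordmap.append(j[0])
--         ClusterCoordDict[i+1] = coordmap
--     return ClusterCoordDict
-- ===== SOURCE B (Python) =====
-- def ClusterCoordPair(MList, NumCluster):
--     ClusterCoordDict = {i + 1: [] for i in range(NumCluster)}
--     for x, c in MList:
--         if 0 <= c < NumCluster: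
--             ClusterCoordDict[c + 1].append(x)
--     return ClusterCoordDict
-- ===== Notes on version B (the rewrite author's own statement) =====
-- stated objective: faster
-- what changed: Replaces the per-cluster rescan of MList (one full pass over MList for every cluster index) by a single pass over MList that appends each coordinate into its pre-initialized cluster bucket.
import Mathlib
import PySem

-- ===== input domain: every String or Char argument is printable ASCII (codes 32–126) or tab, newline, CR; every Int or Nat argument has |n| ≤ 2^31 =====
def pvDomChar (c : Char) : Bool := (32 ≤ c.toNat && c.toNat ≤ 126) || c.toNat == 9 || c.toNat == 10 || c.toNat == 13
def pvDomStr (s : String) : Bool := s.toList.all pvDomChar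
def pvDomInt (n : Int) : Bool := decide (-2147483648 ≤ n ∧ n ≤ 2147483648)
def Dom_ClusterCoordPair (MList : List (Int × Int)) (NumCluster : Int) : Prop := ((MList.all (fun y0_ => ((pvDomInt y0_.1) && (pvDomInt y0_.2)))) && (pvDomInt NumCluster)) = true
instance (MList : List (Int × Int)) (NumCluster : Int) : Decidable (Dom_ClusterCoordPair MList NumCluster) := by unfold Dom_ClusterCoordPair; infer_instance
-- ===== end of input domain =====

-- B replaces A's per-cluster rescan of MList by one pass bucketing into pre-initialized per-cluster lists (faster).
-- ===== PORT A =====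
def ClusterCoordPair (MList : List (Int × Int)) (NumCluster : Int) : List (Int × List Int) :=
  ((PySem.List.pyRange 0 NumCluster 1).foldl
    (fun d i => d.insert (i + 1)
      (MList.foldl (fun coordmap j => if j.2 == i then coordmap ++ [j.1] else coordmap) []))
    PySem.Dict.empty).items

-- ===== PORT B =====
def ClusterCoordPair_alt (MList : List (Int × Int)) (NumCluster : Int) : List (Int × List Int) :=
  (MList.foldl
    (fun d j => if 0 ≤ j.2 ∧ j.2 < NumCluster then d.modify (j.2 + 1) [] (· ++ [j.1]) else d)
    ((PySem.List.pyRange 0 NumCluster 1).foldl (fun d i => d.insert (i + 1) ([] : List Int))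
      PySem.Dict.empty)).items

-- ===== PRECONDITION & SPEC =====
def Spec_ClusterCoordPair (MList : List (Int × Int)) (NumCluster : Int) (out : List (Int × List Int)) : Prop := out = ClusterCoordPair_alt MList NumCluster
instance (MList : List (Int × Int)) (NumCluster : Int) (out : List (Int × List Int)) : Decidable (Spec_ClusterCoordPair MList NumCluster out) := by unfold Spec_ClusterCoordPair; infer_instance

-- ===== CLAIM (what is proved, stated in full; the proofs are below) =====
def Claim_equal_ClusterCoordPair : Prop := ∀ (MList : List (Int × Int)) (NumCluster : Int), Dom_ClusterCoordPair MList NumCluster → Spec_ClusterCoordPair MList NumCluster (ClusterCoordPair MList NumCluster)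

-- ===== LEMMAS AND PROOFS =====

-- ===== VERDICT (by name: the statement is the Claim_ definition above) =====
-- keys 1..N as a list
def pvR (N : Int) : List Int := (PySem.List.pyRange 0 N 1).map (· + 1)

theorem pvR_nodup (N : Int) : (pvR N).Nodup := by
  have h : (pvR N).Pairwise (· < ·) :=
    (PySem.List.pairwise_lt_pyRange_one 0 N).map _ (fun a b hab => by omega)
  exact h.imp (fun hab => by omega)

theorem pv_keys_fold (N : Int) (l : List (Int × Int)) :
    ∀ d : PySem.Dict Int (List Int), d.keys = pvR N →
    (l.foldl (fun d j => if 0 ≤ j.2 ∧ j.2 < N then d.modify (j.2 + 1) [] (· ++ [j.1]) else d) d).keys = pvR N := by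
  induction l with
  | nil => intro d h; exact h
  | cons p t ih =>
    intro d h
    simp only [List.foldl_cons]
    split_ifs with hg
    · apply ih
      have hc : d.contains (p.2 + 1) = true := by
        rw [PySem.Dict.contains_iff_mem_keys, h, pvR, List.mem_map]
        exact ⟨p.2, by rw [PySem.List.mem_pyRange_one]; omega, rfl⟩
      rw [PySem.Dict.keys_modify, PySem.Dict.keys_insert_of_contains d _ hc, h]
    · exact ih d h

theorem pv_getD_fold (N : Int) (l : List (Int × Int)) :
    ∀ d : PySem.Dict Int (List Int), (i : Int) → 0 ≤ i → i < N →
    (l.foldl (fun d j => if 0 ≤ j.2 ∧ j.2 < N then d.modify (j.2 + 1) [] (· ++ [j.1]) else d) d).getD (i + 1) []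
      = d.getD (i + 1) [] ++ (l.filter (fun j => j.2 == i)).map (·.1) := by
  induction l with
  | nil => intro d i _ _; simp
  | cons p t ih =>
    intro d i h0 hN
    simp only [List.foldl_cons, List.filter_cons]
    by_cases hg : 0 ≤ p.2 ∧ p.2 < N
    · rw [if_pos hg, ih _ i h0 hN, PySem.Dict.getD_modify]
      by_cases hpi : p.2 = i
      · rw [if_pos (by omega : i + 1 = p.2 + 1), if_pos (by simp [hpi])]
        simp [hpi, List.append_assoc]
      · rw [if_neg (by omega : ¬ i + 1 = p.2 + 1), if_neg (by simp [hpi])]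
    · have hpi : p.2 ≠ i := by omega
      rw [if_neg hg, if_neg (by simp [hpi]), ih d i h0 hN]

theorem pv_d0_items (N : Int) :
    ((PySem.List.pyRange 0 N 1).foldl (fun d i => d.insert (i + 1) ([] : List Int))
      PySem.Dict.empty).items = (pvR N).map (fun k => (k, ([] : List Int))) := by
  rw [PySem.Dict.items_foldl_insert_fresh _ _ _ _ (fun a _ => PySem.Dict.contains_empty _)
    (pvR_nodup N)]
  simp [pvR, List.map_map, Function.comp_def, PySem.Dict.empty]

theorem ClusterCoordPair_spec : Claim_equal_ClusterCoordPair := by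
  intro MList NumCluster _
  unfold Spec_ClusterCoordPair ClusterCoordPair ClusterCoordPair_alt
  set d0 := (PySem.List.pyRange 0 NumCluster 1).foldl
    (fun d i => d.insert (i + 1) ([] : List Int)) PySem.Dict.empty with hd0
  have hd0i : d0.items = (pvR NumCluster).map (fun k => (k, ([] : List Int))) :=
    pv_d0_items NumCluster
  have hd0k : d0.keys = pvR NumCluster := by
    show d0.items.map (·.1) = pvR NumCluster
    rw [hd0i, List.map_map]; simp [Function.comp_def]
  set F := MList.foldl
    (fun d j => if 0 ≤ j.2 ∧ j.2 < NumCluster then d.modify (j.2 + 1) [] (· ++ [j.1]) else d) d0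
    with hF
  have hFk : F.keys = pvR NumCluster := pv_keys_fold NumCluster MList d0 hd0k
  -- A side
  rw [PySem.Dict.items_foldl_insert_fresh _ _ _ _ (fun a _ => PySem.Dict.contains_empty _)
    (pvR_nodup NumCluster)]
  -- B side
  rw [PySem.Dict.items_eq_map_keys F (hFk ▸ pvR_nodup NumCluster) [], hFk, pvR, List.map_map]
  rw [show (PySem.Dict.empty : PySem.Dict Int (List Int)).items = [] from rfl, List.nil_append]
  apply List.map_congr_left
  intro i hi
  have hiN : 0 ≤ i ∧ i < NumCluster := (PySem.List.mem_pyRange_one.mp hi).imp id id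
  simp only [Function.comp]
  refine Prod.ext rfl ?_
  show (MList.foldl (fun coordmap j => if j.2 == i then coordmap ++ [j.1] else coordmap) []) =
    F.getD (i + 1) []
  rw [hF, pv_getD_fold NumCluster MList d0 i hiN.1 hiN.2]
  have hd0g : d0.getD (i + 1) [] = [] := by
    apply PySem.Dict.getD_of_mem_items
    · rw [hd0i, List.mem_map]
      exact ⟨i + 1, by rw [pvR, List.mem_map]; exact ⟨i, by rw [PySem.List.mem_pyRange_one]; omega, rfl⟩, rfl⟩
    · rw [hd0k]; exact pvR_nodup NumCluster
  rw [hd0g, List.nil_append, PySem.List.foldl_append_if]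
  simp
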